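-- pv_equiv track=rewrite | github.com/Sara-Mlh/BioAlgo-Table-des-suffixes | test_projet.py | HTR
-- ===== SOURCE A (Python) =====
-- def TABSUFF(chaine):
--     indexes = []
--     suffixes = []
--     for i in range(len(chaine)):
--         suffixes.append(chaine[i:])
--         indexes.append(i)
--     suffixes = sorted(suffixes) #suffixes contient les suffixes eux meme
--     indexes.sort(key=lambda x: chaine[x:])  #indexes contient les indices des suffixes dans le texte
--     return indexes, suffixes
--
-- def prefix_commun(word1, word2):
--     l1 = len(word1)
--     l2 = len(word2)
--     i = 0
--     long = ""
--     while i < min(l1, l2) and word1[i] == word2[i]: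
--         long += word1[i]
--         i += 1
--     return long
--
-- def HTR(text):
--     _, suffixes = TABSUFF(text)
--     htr_table = []
--     htr_len = []
--     for i in range(1, len(suffixes)):
--         suffix1 = suffixes[i]
--         suffix2 = suffixes[i - 1]
--         htr_table.append(prefix_commun(suffix1, suffix2))  # htr table contient les préfixes communs
--         htr_len.append(len(prefix_commun(suffix1, suffix2)))  # htr len est la reel et qui contient le len des prefixes
--     return htr_table, htr_len
-- ===== SOURCE B (Python) =====
-- def _lcp_len(u, v):
--     k = 0
--     for a, b in zip(u, v):
--         if a != b:
--             return k
--         k += 1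
--     return k
--
-- def HTR(text):
--     n = len(text)
--     sa = sorted(range(n), key=lambda i: text[i:])
--     table = []
--     lens = []
--     for k in range(1, n):
--         s1 = text[sa[k]:]
--         s2 = text[sa[k - 1]:]
--         l = _lcp_len(s1, s2)
--         table.append(s1[:l])
--         lens.append(l)
--     return table, lens
-- ===== Notes on version B (the rewrite author's own statement) =====
-- stated objective: faster
-- what changed: B sorts the suffix start indices once and, per adjacent pair, counts the common-prefix length in a single integer-counting scan and slices it from the text, instead of A's two sorts (the suffix-string list and the index list) plus building each common prefix char-by-char twice per pair.
import Mathlib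
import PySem

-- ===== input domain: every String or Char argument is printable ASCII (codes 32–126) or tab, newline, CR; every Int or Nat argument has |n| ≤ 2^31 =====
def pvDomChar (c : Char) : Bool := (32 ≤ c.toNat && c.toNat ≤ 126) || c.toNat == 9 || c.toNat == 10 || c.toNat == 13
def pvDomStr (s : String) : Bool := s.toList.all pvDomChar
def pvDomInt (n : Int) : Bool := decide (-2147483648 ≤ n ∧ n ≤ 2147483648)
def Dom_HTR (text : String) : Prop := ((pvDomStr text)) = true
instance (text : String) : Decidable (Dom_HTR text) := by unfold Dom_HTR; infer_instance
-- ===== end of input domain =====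

-- B sorts suffix START INDICES once and computes each adjacent common prefix by one
-- counting scan plus a slice, instead of A's two sorts (suffix strings and indices) and
-- char-by-char prefix string built twice per pair (objective: faster, constant factor).

-- ===== PORT A =====
-- prefix_commun: the while loop building `long` char by char, as structural recursion
def pvPrefixCommun : List Char → List Char → List Char
  | a :: t1, b :: t2 => if a = b then a :: pvPrefixCommun t1 t2 else []
  | _, _ => []

-- TABSUFF: builds (indexes, suffixes); suffixes sorted as strings, indexes sorted by suffix key
def pvTabsuff (cs : List Char) : List Int × List (List Char) :=
  let built := (PySem.List.pyRange 0 (PySem.List.len cs) 1).foldl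
      (fun (st : List (List Char) × List Int) i =>
        (st.1 ++ [PySem.List.slice cs (some i) none], st.2 ++ [i])) ([], [])
  let suffixes := PySem.List.sorted built.1 (fun s => s) false
  let indexes := PySem.List.sorted built.2 (fun x => PySem.List.slice cs (some x) none) false
  (indexes, suffixes)

def HTR (text : String) : List String × List Int :=
  let suffixes := (pvTabsuff text.toList).2
  (PySem.List.pyRange 1 (PySem.List.len suffixes) 1).foldl
    (fun (st : List String × List Int) i =>
      let s1 := PySem.List.pyGetD suffixes i []
      let s2 := PySem.List.pyGetD suffixes (i - 1) []
      (st.1 ++ [String.ofList (pvPrefixCommun s1 s2)],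
       st.2 ++ [PySem.List.len (pvPrefixCommun s1 s2)]))
    ([], [])

-- ===== PORT B =====
-- _lcp_len: the zip loop counting matching leading chars (exact: zip stops at the shorter list)
def pvLcpLen : List Char → List Char → Nat
  | a :: u, b :: v => if a = b then pvLcpLen u v + 1 else 0
  | _, _ => 0

def HTR_alt (text : String) : List String × List Int :=
  let cs := text.toList
  let n := PySem.List.len cs
  let sa := PySem.List.sorted (PySem.List.pyRange 0 n 1)
      (fun i => PySem.List.slice cs (some i) none) false
  (PySem.List.pyRange 1 n 1).foldl
    (fun (st : List String × List Int) k =>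
      let s1 := PySem.List.slice cs (some (PySem.List.pyGetD sa k 0)) none
      let s2 := PySem.List.slice cs (some (PySem.List.pyGetD sa (k - 1) 0)) none
      let l := pvLcpLen s1 s2
      -- s1[:l] with 0 ≤ l is List.take l (exact)
      (st.1 ++ [String.ofList (s1.take l)], st.2 ++ [(l : Int)]))
    ([], [])

-- ===== PRECONDITION & SPEC =====
def Spec_HTR (text : String) (out : List String × List Int) : Prop := out = HTR_alt text
instance (text : String) (out : List String × List Int) : Decidable (Spec_HTR text out) := by unfold Spec_HTR; infer_instance

-- ===== CLAIM (what is proved, stated in full; the proofs are below) =====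
def Claim_equal_HTR : Prop := ∀ (text : String), Dom_HTR text → Spec_HTR text (HTR text)

-- ===== LEMMAS AND PROOFS =====

-- prefix_commun builds exactly the first lcp-length chars of its first argument
lemma prefixCommun_eq_take (u v : List Char) :
    pvPrefixCommun u v = u.take (pvLcpLen u v) := by
  induction u generalizing v with
  | nil => cases v <;> simp [pvPrefixCommun, pvLcpLen]
  | cons a u ih =>
    cases v with
    | nil => simp [pvPrefixCommun, pvLcpLen]
    | cons b v =>
      by_cases h : a = b <;> simp [pvPrefixCommun, pvLcpLen, h, ih]

-- the lcp length never exceeds the first word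
lemma lcpLen_le_left (u v : List Char) : pvLcpLen u v ≤ u.length := by
  induction u generalizing v with
  | nil => cases v <;> simp [pvLcpLen]
  | cons a u ih =>
    cases v with
    | nil => simp [pvLcpLen]
    | cons b v =>
      by_cases h : a = b
      · simp [pvLcpLen, h]
        exact ih v
      · simp [pvLcpLen, h]

-- sorting the mapped values (all distinct) = mapping over the key-sorted originals (stability)
lemma sorted_map_eq_map_sorted {α κ : Type} [LinearOrder κ] (xs : List α) (f : α → κ)
    (h : (xs.map f).Nodup) :
    PySem.List.sorted (xs.map f) (fun s => s) false
      = (PySem.List.sorted xs f false).map f := by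
  apply PySem.List.sorted_eq_of_perm_of_pairwise_lt
  · exact (PySem.List.sorted_perm xs f false).map f
  · have hle := PySem.List.sorted_map_key_pairwise xs f
    have hnd : ((PySem.List.sorted xs f false).map f).Nodup :=
      (((PySem.List.sorted_perm xs f false).map f).nodup_iff).mpr h
    have hne : ((PySem.List.sorted xs f false).map f).Pairwise (· ≠ ·) := hnd
    exact (hle.and hne).imp (fun hab => lt_of_le_of_ne hab.1 hab.2)

-- the same, specialized so the LT instance matches the one the ports elaborate with
lemma sorted_map_eq_map_sorted' (xs : List Int) (f : Int → List Char)
    (h : (xs.map f).Nodup) :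
    PySem.List.sorted (xs.map f) (fun s => s) false
      = (PySem.List.sorted xs f false).map f := by
  have hD : (fun (a b : List Char) => a.decidableLT b)
      = (inferInstance : LinearOrder (List Char)).toDecidableLT := Subsingleton.elim _ _
  rw [hD]
  exact sorted_map_eq_map_sorted xs f h

-- the suffixes of a string are pairwise distinct (their lengths differ)
lemma nodup_suffix_map (cs : List Char) :
    ((PySem.List.pyRange 0 (cs.length : Int) 1).map
      (fun i => PySem.List.slice cs (some i) none)).Nodup := by
  apply (PySem.List.nodup_pyRange_one 0 (cs.length : Int)).map_on
  intro a ha b hb hfab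
  rw [PySem.List.mem_pyRange_one] at ha hb
  rw [PySem.List.slice_from cs ha.1, PySem.List.slice_from cs hb.1] at hfab
  have := congrArg List.length hfab
  simp [List.length_drop] at this
  omega

lemma HTR_eq_alt (text : String) : HTR text = HTR_alt text := by
  unfold HTR HTR_alt pvTabsuff
  simp only [PySem.List.len_eq]
  have hbuilt : ((PySem.List.pyRange 0 ((text.toList.length : Int)) 1).foldl
      (fun (st : List (List Char) × List Int) i =>
        (st.1 ++ [PySem.List.slice text.toList (some i) none], st.2 ++ [i])) ([], [])).1
      = (PySem.List.pyRange 0 ((text.toList.length : Int)) 1).map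
        (fun i => PySem.List.slice text.toList (some i) none) := by
    rw [PySem.List.foldl_prod_mk
      (fun acc i => acc ++ [PySem.List.slice text.toList (some i) none])
      (fun acc (i : Int) => acc ++ [i])]
    simp only [PySem.List.foldl_append_singleton_eq_map, List.nil_append]
  rw [hbuilt, sorted_map_eq_map_sorted' _ _ (nodup_suffix_map text.toList)]
  set cs := text.toList with hcs
  set sa := PySem.List.sorted (PySem.List.pyRange 0 (cs.length : Int) 1)
      (fun i => PySem.List.slice cs (some i) none) false with hsa
  have hlen : sa.length = cs.length := by
    rw [hsa, PySem.List.length_sorted, PySem.List.length_pyRange_one]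
    omega
  have hlen' : (((sa.map (fun i => PySem.List.slice cs (some i) none)).length : Int))
      = ((cs.length : Int)) := by simp [hlen]
  rw [hlen']
  apply PySem.List.foldl_congr_mem
  intro acc i hi
  rw [PySem.List.mem_pyRange_one] at hi
  have h1 : PySem.List.pyGetD (sa.map (fun j => PySem.List.slice cs (some j) none)) i []
      = PySem.List.slice cs (some (PySem.List.pyGetD sa i 0)) none := by
    rw [PySem.List.pyGetD_eq_getElem _ [] (by omega) (by simp [hlen]; omega),
        PySem.List.pyGetD_eq_getElem _ 0 (by omega) (by simp [hlen]; omega)]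
    simp
  have h2 : PySem.List.pyGetD (sa.map (fun j => PySem.List.slice cs (some j) none)) (i - 1) []
      = PySem.List.slice cs (some (PySem.List.pyGetD sa (i - 1) 0)) none := by
    rw [PySem.List.pyGetD_eq_getElem _ [] (by omega) (by simp [hlen]; omega),
        PySem.List.pyGetD_eq_getElem _ 0 (by omega) (by simp [hlen]; omega)]
    simp
  simp only [h1, h2, prefixCommun_eq_take]
  simp [List.length_take, Nat.min_eq_left (lcpLen_le_left _ _)]

-- ===== VERDICT (by name: the statement is the Claim_ definition above) =====
theorem HTR_spec : Claim_equal_HTR := by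
  intro text _
  exact HTR_eq_alt text
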